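-- pv_equiv track=rewrite | github.com/wanshaobo6/LeetCodeTop150 | src/org/alliswell/ArrayString/LeetCode23_找出字符串中第一个匹配项的下标.py | strStr
-- ===== SOURCE A (Python) =====
-- def strStr(haystack: str, needle: str) -> int:
--     def compute_lps(pattern):
--         # 计算最长前缀后缀数组（Longest Prefix Suffix array）
--         lps = [0] * len(pattern)
--         len_pattern = 0
--         i = 1
--         while i < len(pattern):
--             if pattern[i] == pattern[len_pattern]:
--                 len_pattern += 1
--                 lps[i] = len_pattern
--                 i += 1
--             else:
--                 if len_pattern!= 0:
--                     len_pattern = lps[len_pattern - 1]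
--                 else:
--                     lps[i] = 0
--                     i += 1
--         return lps
--
--     m = len(needle)
--     n = len(haystack)
--     if m == 0:
--         return 0
--     lps = compute_lps(needle)
--     i = 0  # haystack 的索引
--     j = 0  # needle 的索引
--     while i < n:
--         if needle[j] == haystack[i]:
--             i += 1
--             j += 1
--         if j == m:
--             return i - j
--         elif i < n and needle[j]!= haystack[i]:
--             if j!= 0:
--                 j = lps[j - 1]
--             else:
--                 i += 1
--     return -1
-- ===== SOURCE B (Python) =====
-- def strStr(haystack: str, needle: str) -> int:
--     m = len(needle)
--     for i in range(len(haystack) - m + 1):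
--         if haystack[i:i + m] == needle:
--             return i
--     return -1
-- ===== Notes on version B (the rewrite author's own statement) =====
-- stated objective: simpler
-- what changed: Replaces KMP (failure-function table plus two-index scan) with a plain naive scan: try each start position and compare the slice; the range bound makes the empty-needle and too-long-needle cases fall out naturally.
import Mathlib
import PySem

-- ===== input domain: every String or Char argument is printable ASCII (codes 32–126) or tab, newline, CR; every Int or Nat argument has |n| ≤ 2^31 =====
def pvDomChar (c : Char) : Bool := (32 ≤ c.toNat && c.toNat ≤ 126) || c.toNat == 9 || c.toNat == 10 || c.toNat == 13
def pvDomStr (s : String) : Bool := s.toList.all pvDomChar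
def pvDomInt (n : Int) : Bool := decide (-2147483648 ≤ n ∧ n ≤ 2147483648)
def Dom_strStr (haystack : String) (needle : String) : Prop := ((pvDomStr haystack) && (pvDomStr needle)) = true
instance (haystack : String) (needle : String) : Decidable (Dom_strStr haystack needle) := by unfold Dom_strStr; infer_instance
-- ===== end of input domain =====

-- B replaces A's KMP (failure-function table + two-index scan) by a plain naive scan
-- (try each start, compare the slice); return values are proved equal on all inputs.

-- ===== PORT A =====
-- A's two while-loops are ported with a fuel counter large enough to never run out
-- (the lemmas below prove the exhausted-fuel branch is unreachable); the always-in-range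
-- indexings pattern[i], needle[j], haystack[i], lps[k] are ported as List.getD, exact there.
def lpsLoop (p : List Char) (fuel : Nat) (lps : List Nat) (len i : Nat) : List Nat :=
  match fuel with
  | 0 => lps
  | fuel + 1 =>
    if i < p.length then
      if p.getD i ' ' = p.getD len ' ' then
        lpsLoop p fuel (lps.set i (len + 1)) (len + 1) (i + 1)
      else if len ≠ 0 then
        lpsLoop p fuel lps (lps.getD (len - 1) 0) i
      else
        lpsLoop p fuel (lps.set i 0) len (i + 1)
    else lps

def computeLps (p : List Char) : List Nat :=
  lpsLoop p (2 * p.length) (List.replicate p.length 0) 0 1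

def kmpLoop (s p : List Char) (lps : List Nat) (fuel i j : Nat) : Int :=
  match fuel with
  | 0 => -1  -- unreachable (proved below)
  | fuel + 1 =>
    if i < s.length then
      let ij := if p.getD j ' ' = s.getD i ' ' then (i + 1, j + 1) else (i, j)
      if ij.2 = p.length then (ij.1 : Int) - (ij.2 : Int)
      else if ij.1 < s.length ∧ p.getD ij.2 ' ' ≠ s.getD ij.1 ' ' then
        if ij.2 ≠ 0 then kmpLoop s p lps fuel ij.1 (lps.getD (ij.2 - 1) 0)
        else kmpLoop s p lps fuel (ij.1 + 1) ij.2
      else kmpLoop s p lps fuel ij.1 ij.2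
    else -1

def strStr (haystack : String) (needle : String) : Int :=
  let p := needle.toList
  let s := haystack.toList
  if p.length = 0 then 0
  else kmpLoop s p (computeLps p) (2 * s.length + 1) 0 0

-- ===== PORT B =====
-- for i in range(len(haystack) - len(needle) + 1): the range condition is i + m ≤ n;
-- the slice haystack[i:i+m] is ported as (s.drop i).take m (exact for these in-range bounds).
def naiveLoop (s p : List Char) (i : Nat) : Int :=
  if i + p.length ≤ s.length then
    if (s.drop i).take p.length = p then (i : Int) else naiveLoop s p (i + 1)
  else -1
termination_by s.length + 1 - i
decreasing_by omega

def strStr_alt (haystack : String) (needle : String) : Int :=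
  naiveLoop haystack.toList needle.toList 0

-- ===== PRECONDITION & SPEC =====
def Spec_strStr (haystack : String) (needle : String) (out : Int) : Prop := out = strStr_alt haystack needle
instance (haystack : String) (needle : String) (out : Int) : Decidable (Spec_strStr haystack needle out) := by unfold Spec_strStr; infer_instance

-- ===== CLAIM (what is proved, stated in full; the proofs are below) =====
def Claim_equal_strStr : Prop := ∀ (haystack : String) (needle : String), Dom_strStr haystack needle → Spec_strStr haystack needle (strStr haystack needle)

-- ===== LEMMAS AND PROOFS =====

/-- `k` is a (proper) border of the length-`ℓ` prefix of `p`. -/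
def Border (p : List Char) (ℓ k : Nat) : Prop := k < ℓ ∧ p.take k <:+ p.take ℓ

/-- `k` is the longest border of the length-`ℓ` prefix. -/
def MaxB (p : List Char) (ℓ k : Nat) : Prop := Border p ℓ k ∧ ∀ k', Border p ℓ k' → k' ≤ k

/-- Full correctness of an lps table. -/
def LpsOK (p : List Char) (L : List Nat) : Prop :=
  L.length = p.length ∧ ∀ q, q < p.length → MaxB p (q + 1) (L.getD q 0)

theorem suffix_append_single {α : Type} {u v : List α} (a : α) (h : u <:+ v) :
    u ++ [a] <:+ v ++ [a] := by
  obtain ⟨w, rfl⟩ := h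
  exact ⟨w, by simp⟩

theorem append_single_suffix {α : Type} {u v : List α} {a b : α}
    (h : u ++ [a] <:+ v ++ [b]) : u <:+ v ∧ a = b := by
  obtain ⟨w, hw⟩ := h
  rw [← List.append_assoc] at hw
  obtain ⟨h1, h2⟩ := List.append_inj' hw (by simp)
  exact ⟨⟨w, h1⟩, by simpa using h2⟩

theorem take_ext {l₁ l₂ : List Char} {k ℓ : Nat}
    (h : l₁.take k <:+ l₂.take ℓ) (hk : k < l₁.length) (hℓ : ℓ < l₂.length)
    (hc : l₁.getD k ' ' = l₂.getD ℓ ' ') :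
    l₁.take (k + 1) <:+ l₂.take (ℓ + 1) := by
  rw [List.take_add_one, List.take_add_one, List.getElem?_eq_getElem hk,
    List.getElem?_eq_getElem hℓ]
  have : l₁[k] = l₂[ℓ] := by
    rwa [List.getD_eq_getElem _ _ hk, List.getD_eq_getElem _ _ hℓ] at hc
  rw [Option.toList_some, Option.toList_some, this]
  exact suffix_append_single _ h

theorem take_shrink {l₁ l₂ : List Char} {k ℓ : Nat}
    (h : l₁.take (k + 1) <:+ l₂.take (ℓ + 1)) (hk : k < l₁.length) (hℓ : ℓ < l₂.length) :
    l₁.take k <:+ l₂.take ℓ ∧ l₁.getD k ' ' = l₂.getD ℓ ' ' := by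
  rw [List.take_add_one, List.take_add_one, List.getElem?_eq_getElem hk,
    List.getElem?_eq_getElem hℓ, Option.toList_some, Option.toList_some] at h
  obtain ⟨h1, h2⟩ := append_single_suffix h
  exact ⟨h1, by rwa [List.getD_eq_getElem _ _ hk, List.getD_eq_getElem _ _ hℓ]⟩

theorem take_suffix_of_le {p : List Char} {k j : Nat} {s : List Char}
    (h1 : p.take k <:+ s) (h2 : p.take j <:+ s) (hkj : k ≤ j) :
    p.take k <:+ p.take j := by
  exact List.suffix_of_suffix_length_le h1 h2 (by simp [List.length_take]; omega)

theorem lpsLoop_ok (p : List Char) : ∀ (fuel : Nat) (lps : List Nat) (len i : Nat),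
    1 ≤ i → i ≤ p.length → len < i →
    lps.length = p.length →
    (∀ q, q < i → MaxB p (q + 1) (lps.getD q 0)) →
    p.take len <:+ p.take i →
    (i < p.length → ∀ k, Border p (i + 1) k → k ≤ len + 1) →
    2 * (p.length - i) + len + 1 ≤ fuel →
    LpsOK p (lpsLoop p fuel lps len i) := by
  intro fuel
  induction fuel with
  | zero => intro lps len i _ _ _ _ _ _ _ hf; omega
  | succ fuel ih =>
    intro lps len i h1 h2 h3 h4 h5 h6 h7 hf
    rw [lpsLoop]
    split_ifs with hi hc hlen
    · -- match: chars at i and len agree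
      have hlenm : len < p.length := by omega
      have hext : p.take (len + 1) <:+ p.take (i + 1) := take_ext h6 hlenm hi hc.symm
      have hmax : MaxB p (i + 1) (len + 1) := ⟨⟨by omega, hext⟩, h7 hi⟩
      refine ih (lps.set i (len + 1)) (len + 1) (i + 1) (by omega) hi (by omega)
        (by simpa using h4) ?_ hext ?_ (by omega)
      · intro q hq
        by_cases hqi : q = i
        · rw [hqi]
          have hv : (lps.set i (len + 1)).getD i 0 = len + 1 := by
            rw [List.getD_eq_getElem?_getD, List.getElem?_set_self (by omega), Option.getD_some]
          rw [hv]; exact hmax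
        · have hv : (lps.set i (len + 1)).getD q 0 = lps.getD q 0 := by
            rw [List.getD_eq_getElem?_getD, List.getElem?_set_ne (fun h => hqi h.symm),
              ← List.getD_eq_getElem?_getD]
          rw [hv]; exact h5 q (by omega)
      · intro hi1 k hb
        match k with
        | 0 => omega
        | k' + 1 =>
          have hklt : k' + 1 < i + 1 + 1 := hb.1
          obtain ⟨hs', _⟩ := take_shrink hb.2 (by omega) hi1
          have := hmax.2 k' ⟨by omega, hs'⟩
          omega
    · -- mismatch, len ≠ 0: fall back to lps[len-1]
      have hq := h5 (len - 1) (by omega)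
      rw [(by omega : len - 1 + 1 = len)] at hq
      have hlt : lps.getD (len - 1) 0 < len := hq.1.1
      refine ih lps (lps.getD (len - 1) 0) i h1 h2 (by omega) h4 h5
        (hq.1.2.trans h6) ?_ (by omega)
      intro hi' k hb
      match k with
      | 0 => omega
      | k' + 1 =>
        have hklt : k' + 1 < i + 1 := hb.1
        by_cases hk1 : k' = len
        · subst hk1
          obtain ⟨_, hchar⟩ := take_shrink hb.2 (by omega) hi'
          exact absurd hchar.symm hc
        · have hle : k' + 1 ≤ len + 1 := h7 hi' _ hb
          obtain ⟨hs', _⟩ := take_shrink hb.2 (by omega) hi'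
          have hss := take_suffix_of_le hs' h6 (by omega)
          have := hq.2 k' ⟨by omega, hss⟩
          omega
    · -- mismatch, len = 0: lps[i] := 0
      have hl0 : len = 0 := by omega
      subst hl0
      have hmax : MaxB p (i + 1) 0 := by
        refine ⟨⟨by omega, by simp⟩, ?_⟩
        intro k hb
        match k with
        | 0 => omega
        | k' + 1 =>
          have hle : k' + 1 ≤ 0 + 1 := h7 hi _ hb
          have hk0 : k' = 0 := by omega
          subst hk0
          obtain ⟨_, hchar⟩ := take_shrink hb.2 (by omega) hi
          exact absurd hchar.symm hc
      refine ih (lps.set i 0) 0 (i + 1) (by omega) hi (by omega)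
        (by simpa using h4) ?_ (by simp) ?_ (by omega)
      · intro q hq
        by_cases hqi : q = i
        · rw [hqi]
          have hv : (lps.set i 0).getD i 0 = 0 := by
            rw [List.getD_eq_getElem?_getD, List.getElem?_set_self (by omega), Option.getD_some]
          rw [hv]; exact hmax
        · have hv : (lps.set i 0).getD q 0 = lps.getD q 0 := by
            rw [List.getD_eq_getElem?_getD, List.getElem?_set_ne (fun h => hqi h.symm),
              ← List.getD_eq_getElem?_getD]
          rw [hv]; exact h5 q (by omega)
      · intro hi1 k hb
        match k with
        | 0 => omega
        | k' + 1 =>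
          have hklt : k' + 1 < i + 1 + 1 := hb.1
          obtain ⟨hs', _⟩ := take_shrink hb.2 (by omega) hi1
          have := hmax.2 k' ⟨by omega, hs'⟩
          omega
    · -- i = p.length: loop exits
      exact ⟨h4, fun q hq => h5 q (by omega)⟩

theorem computeLps_ok (p : List Char) (hm : 1 ≤ p.length) : LpsOK p (computeLps p) := by
  refine lpsLoop_ok p (2 * p.length) (List.replicate p.length 0) 0 1 (le_refl 1) hm
    (by omega) (by simp) ?_ (by simp) ?_ (by omega)
  · intro q hq
    have hq0 : q = 0 := by omega
    subst hq0
    have h0 : (List.replicate p.length (0 : Nat)).getD 0 0 = 0 := by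
      simp [List.getD_eq_getElem?_getD, show 0 < p.length by omega]
    rw [h0]
    exact ⟨⟨by omega, by simp⟩, fun k hk => by have := hk.1; omega⟩
  · intro _ k hb
    have := hb.1
    omega

theorem naive_succ_of_not_occ {s p : List Char} {t : Nat} (h : ¬ p <+: s.drop t) :
    naiveLoop s p t = naiveLoop s p (t + 1) := by
  rw [naiveLoop]
  split_ifs with h1 h2
  · exact absurd (List.prefix_iff_eq_take.mpr h2.symm) h
  · rfl
  · rw [naiveLoop, if_neg (by omega)]

theorem naive_eq_of_none_lt {s p : List Char} (t : Nat)
    (h : ∀ u, u < t → ¬ p <+: s.drop u) :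
    naiveLoop s p 0 = naiveLoop s p t := by
  induction t with
  | zero => rfl
  | succ t ih =>
      rw [ih (fun u hu => h u (by omega)), naive_succ_of_not_occ (h t (by omega))]

theorem naive_at_occ {s p : List Char} {t : Nat} (h : p <+: s.drop t) (ht : t ≤ s.length) :
    naiveLoop s p t = (t : Int) := by
  have hlen : p.length ≤ s.length - t := by simpa using h.length_le
  rw [naiveLoop, if_pos (by omega), if_pos (List.prefix_iff_eq_take.mp h).symm]

theorem naive_none {s p : List Char} (h : ∀ t, ¬ p <+: s.drop t) (i : Nat) :
    naiveLoop s p i = -1 := by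
  rw [naiveLoop]
  split_ifs with h1 h2
  · exact absurd (List.prefix_iff_eq_take.mpr h2.symm) (h i)
  · exact naive_none h (i + 1)
  · rfl
termination_by s.length + 1 - i
decreasing_by omega

theorem occ_getD {s p : List Char} {t off : Nat} (hocc : p <+: s.drop t)
    (hoff : off < p.length) : p.getD off ' ' = s.getD (t + off) ' ' := by
  have hPl : p.length ≤ s.length - t := by simpa using hocc.length_le
  have hbound : t + off < s.length := by omega
  rw [List.getD_eq_getElem _ _ hoff, List.getD_eq_getElem _ _ hbound]
  rw [hocc.getElem hoff]
  simp [List.getElem_drop]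

theorem occ_take_suffix {s p : List Char} {t i' : Nat} (hocc : p <+: s.drop t)
    (_ht : t ≤ i') (_hi : i' ≤ s.length) (_hkm : i' - t ≤ p.length) :
    p.take (i' - t) <:+ s.take i' := by
  have h1 : p.take (i' - t) = (s.drop t).take (i' - t) := by
    rw [List.prefix_iff_eq_take.mp hocc, List.take_take]
    congr 1
    omega
  rw [h1, ← List.drop_take]
  exact List.drop_suffix ..

theorem kmpLoop_ok (s p : List Char) (L : List Nat) (hL : LpsOK p L) (hm : 1 ≤ p.length) :
    ∀ (fuel i j : Nat), j ≤ i → i ≤ s.length → j < p.length →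
    p.take j <:+ s.take i →
    (∀ t, t < i - j → ¬ p <+: s.drop t) →
    2 * (s.length - i) + j + 1 ≤ fuel →
    kmpLoop s p L fuel i j = naiveLoop s p 0 := by
  intro fuel
  induction fuel with
  | zero => intro i j _ _ _ _ _ hf; omega
  | succ fuel ih =>
    intro i j hji hin hjm hsuf hno hf
    rw [kmpLoop]
    by_cases hi : i < s.length
    swap
    · rw [if_neg hi]
      symm
      apply naive_none
      intro t hocc
      have hlen : p.length ≤ s.length - t := by simpa using hocc.length_le
      exact hno t (by omega) hocc
    rw [if_pos hi]
    by_cases hc : p.getD j ' ' = s.getD i ' '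
    · simp only [if_pos hc]
      have hsuf' : p.take (j + 1) <:+ s.take (i + 1) := take_ext hsuf hjm hi hc
      by_cases hjm' : j + 1 = p.length
      · -- full match found at t = i - j
        rw [if_pos hjm']
        have hocc : p <+: s.drop (i - j) := by
          obtain ⟨w, hw⟩ := hsuf'
          rw [hjm', List.take_length] at hw
          have hwl : w.length = i - j := by
            have := congrArg List.length hw
            simp at this
            omega
          have hseg : s.drop (i - j) = p ++ s.drop (i + 1) := by
            conv_lhs => rw [← List.take_append_drop (i + 1) s]
            rw [List.drop_append_of_le_length (by simp; omega), ← hw, ← hwl,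
              List.drop_left]
          rw [hseg]
          exact List.prefix_append ..
        rw [naive_eq_of_none_lt (i - j) hno, naive_at_occ hocc (by omega)]
        omega
      · rw [if_neg hjm']
        by_cases helse : i + 1 < s.length ∧ p.getD (j + 1) ' ' ≠ s.getD (i + 1) ' '
        · rw [if_pos helse, if_pos (by omega : ¬ j + 1 = 0)]
          obtain ⟨hi1, hne⟩ := helse
          have hqmax := (hL.2 ((j + 1) - 1) (by omega)).2
          rw [(by omega : (j + 1) - 1 + 1 = j + 1)] at hqmax
          have hqb := (hL.2 ((j + 1) - 1) (by omega)).1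
          rw [(by omega : (j + 1) - 1 + 1 = j + 1)] at hqb
          set j2 := L.getD ((j + 1) - 1) 0 with hj2
          have hj2lt : j2 < j + 1 := hqb.1
          apply ih (i + 1) j2 (by omega) (by omega) (by omega)
            (hqb.2.trans hsuf')
          · -- no occurrence before (i+1) - j2
            intro t ht hocc
            by_cases htlo : t < i - j
            · exact hno t (by omega) hocc
            · set k := (i + 1) - t with hk
              have hkj : k ≤ j + 1 := by omega
              by_cases hkj' : k = j + 1
              · -- would force p[j+1] = s[i+1]
                apply hne
                have := occ_getD hocc (show j + 1 < p.length by omega)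
                rw [(by omega : t + (j + 1) = i + 1)] at this
                exact this
              · have hksuf : p.take k <:+ s.take (i + 1) :=
                  occ_take_suffix hocc (by omega) (by omega) (by omega)
                have hb : p.take k <:+ p.take (j + 1) :=
                  take_suffix_of_le hksuf hsuf' (by omega)
                have := hqmax k ⟨by omega, hb⟩
                omega
          · omega
        · rw [if_neg helse]
          exact ih (i + 1) (j + 1) (by omega) (by omega) (by omega) hsuf'
            (by intro t ht; exact hno t (by omega)) (by omega)
    · simp only [if_neg hc]
      rw [if_neg (by omega : ¬ j = p.length), if_pos (⟨hi, hc⟩ :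
        i < s.length ∧ p.getD j ' ' ≠ s.getD i ' ')]
      by_cases hj0 : j ≠ 0
      · rw [if_pos hj0]
        have hqb := (hL.2 (j - 1) (by omega)).1
        have hqmax := (hL.2 (j - 1) (by omega)).2
        rw [(by omega : j - 1 + 1 = j)] at hqb hqmax
        set j2 := L.getD (j - 1) 0 with hj2
        have hj2lt : j2 < j := hqb.1
        apply ih i j2 (by omega) (by omega) (by omega) (hqb.2.trans hsuf)
        · intro t ht hocc
          by_cases htlo : t < i - j
          · exact hno t (by omega) hocc
          · set k := i - t with hk
            have hkj : k ≤ j := by omega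
            by_cases hkj' : k = j
            · apply hc
              have := occ_getD hocc (show j < p.length by omega)
              rw [(by omega : t + j = i)] at this
              exact this
            · have hksuf : p.take k <:+ s.take i :=
                occ_take_suffix hocc (by omega) (by omega) (by omega)
              have hb := take_suffix_of_le hksuf hsuf (by omega)
              have := hqmax k ⟨by omega, hb⟩
              omega
        · omega
      · rw [if_neg hj0]
        have hj0' : j = 0 := by omega
        apply ih (i + 1) j (by omega) (by omega) hjm (by rw [hj0']; simp)
        · intro t ht hocc
          by_cases htlo : t < i - j
          · exact hno t (by omega) hocc
          · apply hc
            have := occ_getD hocc (show j < p.length by omega)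
            rw [(by omega : t + j = i)] at this
            exact this
        · omega

-- ===== VERDICT (by name: the statement is the Claim_ definition above) =====
theorem strStr_spec : Claim_equal_strStr := by
  intro haystack needle _
  unfold Spec_strStr strStr strStr_alt
  by_cases hm : needle.toList.length = 0
  · simp [List.length_eq_zero_iff.mp hm, naiveLoop]
  · simp only [hm, ite_false]
    exact kmpLoop_ok _ _ _ (computeLps_ok _ (by omega)) (by omega) _ 0 0
      (le_refl 0) (by omega) (by omega) (by simp) (by omega) (by omega)
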